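-- pv_equiv track=rewrite | github.com/PharenIT/Python-Toon-Schema | src/decoder.py | _parse_keys
-- ===== SOURCE A (Python) =====
-- def _unescape_string(text: str) -> str:
--     result = []
--     i = 0
--     while i < len(text):
--         ch = text[i]
--         if ch != "\\":
--             result.append(ch)
--             i += 1
--             continue
--         i += 1
--         if i >= len(text):
--             break
--         esc = text[i]
--         if esc == "n":
--             result.append("\n")
--         elif esc == "r":
--             result.append("\r")
--         elif esc == "t":
--             result.append("\t")
--         else:
--             result.append(esc)
--         i += 1
--     return "".join(result)
--
-- def _skip_ws(text: str, idx: int) -> int: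
--     while idx < len(text) and text[idx].isspace():
--         idx += 1
--     return idx
--
-- def _parse_quoted(text: str, idx: int) -> tuple[str, int]:
--     idx += 1
--     start = idx
--     buf = []
--     while idx < len(text):
--         ch = text[idx]
--         if ch == "\\" and idx + 1 < len(text):
--             buf.append(text[idx])
--             buf.append(text[idx + 1])
--             idx += 2
--             continue
--         if ch == "\"":
--             raw = "".join(buf) if buf else text[start:idx]
--             return _unescape_string(raw), idx + 1
--         buf.append(ch)
--         idx += 1
--     return _unescape_string(text[start:idx]), idx
--
-- def _parse_token(text: str, idx: int, stop_chars: set[str]) -> tuple[str, int]: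
--     idx = _skip_ws(text, idx)
--     if idx >= len(text):
--         return "", idx
--     if text[idx] == "\"":
--         value, idx = _parse_quoted(text, idx)
--         return value, idx
--     start = idx
--     while idx < len(text):
--         ch = text[idx]
--         if ch.isspace() or ch in stop_chars:
--             break
--         idx += 1
--     return text[start:idx], idx
--
-- def _parse_keys(text: str, idx: int) -> tuple[list[str], int]:
--     keys = []
--     idx += 1
--     idx = _skip_ws(text, idx)
--     if idx < len(text) and text[idx] == "}":
--         return keys, idx + 1
--     while idx < len(text):
--         key, idx = _parse_token(text, idx, {",", "}"})
--         keys.append(str(key))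
--         idx = _skip_ws(text, idx)
--         if idx >= len(text):
--             break
--         if text[idx] == ",":
--             idx += 1
--             continue
--         if text[idx] == "}":
--             return keys, idx + 1
--     return keys, idx
-- ===== SOURCE B (Python) =====
-- def _take_quoted(u):
--     # u is the text after an opening quote; consume up to a closing quote,
--     # unescaping on the fly; a lone trailing backslash escapes nothing.
--     out = []
--     while u:
--         if u[0] == "\\":
--             if len(u) >= 2:
--                 e = u[1]
--                 out.append({"n": "\n", "r": "\r", "t": "\t"}.get(e, e))
--                 u = u[2:]
--             else:
--                 u = ""
--         elif u[0] == '"':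
--             return "".join(out), u[1:]
--         else:
--             out.append(u[0])
--             u = u[1:]
--     return "".join(out), u
--
--
-- def _parse_keys(text, idx):
--     # Suffix-consuming rewrite: work on the remaining substring only; the
--     # absolute index is recovered as m - len(remaining).  Return-value
--     # equivalence with A is claimed for idx >= -1 (see Pre_).
--     rem = text[idx + 1:]
--     m = idx + 1 + len(rem)
--     rem = rem.lstrip()
--     if rem.startswith("}"):
--         return [], m - len(rem) + 1
--     keys = []
--     while rem:
--         t = rem.lstrip()
--         if not t:
--             keys.append("")
--             rem = ""
--             break
--         if t[0] == '"':
--             key, t2 = _take_quoted(t[1:])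
--             keys.append(key)
--         else:
--             j = next((k for k, c in enumerate(t) if c.isspace() or c in ',}'), len(t))
--             keys.append(t[:j])
--             t2 = t[j:]
--         t3 = t2.lstrip()
--         if not t3:
--             rem = ""
--             break
--         if t3[0] == ",":
--             rem = t3[1:]
--         elif t3[0] == "}":
--             return keys, m - len(t3) + 1
--         else:
--             rem = t3
--     return keys, m - len(rem)
-- ===== Notes on version B (the rewrite author's own statement) =====
-- stated objective: alternative
-- what changed: A walks absolute integer indices through a hierarchy of helper scanners (_skip_ws, _parse_quoted with a collect-then-_unescape_string pass, _parse_token with a stop-set); B instead consumes the remaining SUFFIX of the text (lstrip, slicing, a first-stop-char search), unescapes quoted content on the fly, and recovers the returned index arithmetically as m - len(remaining).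
-- outside the precondition, e.g. on _parse_keys('""', -2): A returns (['', ''], 2), B returns ([''], 0)
import Mathlib
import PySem

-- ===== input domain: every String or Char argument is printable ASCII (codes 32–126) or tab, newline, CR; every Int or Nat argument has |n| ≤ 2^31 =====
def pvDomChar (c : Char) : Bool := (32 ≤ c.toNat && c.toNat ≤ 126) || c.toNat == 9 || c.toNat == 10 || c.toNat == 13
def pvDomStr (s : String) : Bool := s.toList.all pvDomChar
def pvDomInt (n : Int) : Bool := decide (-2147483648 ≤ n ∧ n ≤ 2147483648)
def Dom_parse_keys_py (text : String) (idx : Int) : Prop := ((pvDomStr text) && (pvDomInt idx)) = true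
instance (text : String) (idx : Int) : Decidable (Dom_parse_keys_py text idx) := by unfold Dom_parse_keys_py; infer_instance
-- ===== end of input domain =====

-- B replaces A's absolute-index helper-scanner hierarchy (_skip_ws/_parse_quoted with a
-- collect-then-unescape pass/_parse_token with a stop-set) by a suffix-consuming rewrite:
-- it works on the remaining substring only (lstrip/slicing, on-the-fly unescaping) and
-- recovers the returned index as m - len(remaining) (objective: alternative, same cost).


-- ===== PORT A =====
-- A-side helpers. pvAtA is the total form of Python's text[i]; under Pre_ every access
-- the ports make is in range, so the default is never the result. Each while-loop is
-- ported as structural recursion on a fuel argument (a pure totality guard); every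
-- call site passes fuel s.length + 1, which under Pre_ exceeds the iteration count,
-- and on fuel exhaustion a loop returns its normal loop-exit value.
def pvAtA (s : List Char) (i : Int) : Char := (PySem.List.pyGet? s i).getD ' '

def pvSkipWsA (s : List Char) : Nat → Int → Int
  | 0, i => i
  | fuel + 1, i =>
    if i < (s.length : Int) ∧ PySem.Chars.isspace (pvAtA s i) = true then
      pvSkipWsA s fuel (i + 1)
    else i

def pvEsc (e : Char) : Char :=
  if e = 'n' then '\n' else if e = 'r' then '\r' else if e = 't' then '\t' else e

def pvUnescA : List Char → List Char
  | [] => []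
  | c :: rest =>
    if c = '\\' then
      match rest with
      | [] => []
      | e :: rest' => pvEsc e :: pvUnescA rest'
    else c :: pvUnescA rest

def pvQuotedA (s : List Char) (start : Int) : Nat → List Char → Int → List Char × Int
  | 0, _, i => (pvUnescA (PySem.List.slice s (some start) (some i)), i)
  | fuel + 1, buf, i =>
    if i < (s.length : Int) then
      if pvAtA s i = '\\' ∧ i + 1 < (s.length : Int) then
        pvQuotedA s start fuel (buf ++ [pvAtA s i, pvAtA s (i + 1)]) (i + 2)
      else if pvAtA s i = '"' then
        (pvUnescA (if buf ≠ [] then buf else PySem.List.slice s (some start) (some i)), i + 1)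
      else
        pvQuotedA s start fuel (buf ++ [pvAtA s i]) (i + 1)
    else
      (pvUnescA (PySem.List.slice s (some start) (some i)), i)

def pvStop : PySem.Set Char := PySem.Set.ofList [',', '}']

def pvBareA (s : List Char) (stop : PySem.Set Char) : Nat → Int → Int
  | 0, i => i
  | fuel + 1, i =>
    if i < (s.length : Int) ∧
        ¬ (PySem.Chars.isspace (pvAtA s i) = true ∨
           PySem.Set.contains stop (pvAtA s i) = true) then
      pvBareA s stop fuel (i + 1)
    else i

def pvTokenA (s : List Char) (idx : Int) (stop : PySem.Set Char) : List Char × Int :=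
  let i := pvSkipWsA s (s.length + 1) idx
  if (s.length : Int) ≤ i then ([], i)
  else if pvAtA s i = '"' then pvQuotedA s (i + 1) (s.length + 1) [] (i + 1)
  else
    let j := pvBareA s stop (s.length + 1) i
    (PySem.List.slice s (some i) (some j), j)

def pvLoopA (s : List Char) : Nat → List String → Int → List String × Int
  | 0, keys, i => (keys, i)
  | fuel + 1, keys, i =>
    if i < (s.length : Int) then
      let kj := pvTokenA s i pvStop
      let keys' := keys ++ [String.ofList kj.1]
      let i1 := pvSkipWsA s (s.length + 1) kj.2
      if (s.length : Int) ≤ i1 then (keys', i1)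
      else if pvAtA s i1 = ',' then pvLoopA s fuel keys' (i1 + 1)
      else if pvAtA s i1 = '}' then (keys', i1 + 1)
      else pvLoopA s fuel keys' i1
    else (keys, i)

def parse_keys_py (text : String) (idx : Int) : List String × Int :=
  let s := text.toList
  let i := pvSkipWsA s (s.length + 1) (idx + 1)
  if i < (s.length : Int) ∧ pvAtA s i = '}' then ([], i + 1)
  else pvLoopA s (s.length + 1) [] i

-- ===== PORT B =====
-- B-side helpers (suffix-consuming rewrite; the loop's fuel is the length of the
-- remaining suffix + 1, which bounds the iteration count since every iteration
-- strictly shortens the suffix).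
def pvEscDict : PySem.Dict Char Char := PySem.Dict.ofList [('n', '\n'), ('r', '\r'), ('t', '\t')]

def pvTakeQuoted (out : List Char) : List Char → List Char × List Char
  | [] => (out, [])
  | c :: rest =>
    if c = '\\' then
      match rest with
      | [] => (out, [])
      | e :: rest' => pvTakeQuoted (out ++ [PySem.Dict.getD pvEscDict e e]) rest'
    else if c = '"' then (out, rest)
    else pvTakeQuoted (out ++ [c]) rest

def pvStopChar (c : Char) : Bool := PySem.Chars.isspace c || c == ',' || c == '}'

def pvLoopAlt (m : Int) : Nat → List String → List Char → List String × Int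
  | 0, keys, rem => (keys, m - (rem.length : Int))
  | fuel + 1, keys, rem =>
    if rem.isEmpty then (keys, m - (rem.length : Int))
    else
      let t := PySem.Chars.lstrip rem
      if t.isEmpty then (keys ++ [""], m)
      else
        let kt :=
          if t.head? = some '"' then
            let kr := pvTakeQuoted [] t.tail
            (keys ++ [String.ofList kr.1], kr.2)
          else
            (keys ++ [String.ofList (t.takeWhile (fun ch => !pvStopChar ch))],
             t.dropWhile (fun ch => !pvStopChar ch))
        let t3 := PySem.Chars.lstrip kt.2
        if t3.isEmpty then (kt.1, m)
        else if t3.head? = some ',' then pvLoopAlt m fuel kt.1 t3.tail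
        else if t3.head? = some '}' then (kt.1, m - (t3.length : Int) + 1)
        else pvLoopAlt m fuel kt.1 t3

def parse_keys_py_alt (text : String) (idx : Int) : List String × Int :=
  let s := text.toList
  let rem0 := PySem.List.slice s (some (idx + 1)) none
  let m : Int := idx + 1 + (rem0.length : Int)
  let rem := PySem.Chars.lstrip rem0
  if rem.head? = some '}' then ([], m - (rem.length : Int) + 1)
  else pvLoopAlt m (rem.length + 1) [] rem

-- ===== PRECONDITION & SPEC =====
-- Pre_ excludes start indices idx ≤ -2: there Python A either raises IndexError
-- (idx + 1 < -len(text)) or returns values produced by negative-index wraparound and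
-- negative-slice arithmetic, an accident of A's implementation and not a value either
-- program is meant to produce.
def Pre_parse_keys_py (text : String) (idx : Int) : Prop := -1 ≤ idx
instance (text : String) (idx : Int) : Decidable (Pre_parse_keys_py text idx) := by
  unfold Pre_parse_keys_py; infer_instance

def pvWitness_parse_keys_py : String × Int := ("{a, \"b c\", d}", 0)

def Spec_parse_keys_py (text : String) (idx : Int) (out : List String × Int) : Prop :=
  out = parse_keys_py_alt text idx
instance (text : String) (idx : Int) (out : List String × Int) :
    Decidable (Spec_parse_keys_py text idx out) := by
  unfold Spec_parse_keys_py; infer_instance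

-- ===== CLAIM =====
def Claim_equal_parse_keys_py : Prop :=
  ∀ (text : String) (idx : Int), Dom_parse_keys_py text idx → Pre_parse_keys_py text idx →
    Spec_parse_keys_py text idx (parse_keys_py text idx)

-- ===== LEMMAS AND PROOFS =====

-- basic char/suffix bridges
theorem pvAt_getElem (s : List Char) (i : Int) (h0 : 0 ≤ i) (hn : i < (s.length : Int)) :
    pvAtA s i = s[i.toNat]'(by omega) := by
  rw [pvAtA, PySem.List.pyGet?_of_nonneg s h0,
      List.getElem?_eq_getElem (by omega : i.toNat < s.length)]
  rfl

theorem pvDrop_cons (s : List Char) (i : Int) (h0 : 0 ≤ i) (hn : i < (s.length : Int)) :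
    s.drop i.toNat = pvAtA s i :: s.drop (i + 1).toNat := by
  have h2 : (i + 1).toNat = i.toNat + 1 := by omega
  rw [pvAt_getElem s i h0 hn, h2, List.drop_eq_getElem_cons (by omega : i.toNat < s.length)]

theorem pvDropWhile_head {p : Char → Bool} {l : List Char} {c : Char} {u : List Char}
    (h : l.dropWhile p = c :: u) : p c = false := by
  induction l with
  | nil => simp [List.dropWhile] at h
  | cons a l ih =>
    rw [List.dropWhile_cons] at h
    by_cases hp : p a = true
    · exact ih (by simpa [hp] using h)
    · rw [if_neg hp] at h
      cases h
      simpa using hp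

theorem pvDrop_len_takeWhile (p : Char → Bool) (l : List Char) :
    l.drop (l.takeWhile p).length = l.dropWhile p := by
  induction l with
  | nil => simp
  | cons a l ih =>
    rw [List.takeWhile_cons, List.dropWhile_cons]
    by_cases hp : p a = true
    · simp [hp, ih]
    · simp [hp]

theorem pvTake_len_takeWhile (p : Char → Bool) (l : List Char) :
    l.take (l.takeWhile p).length = l.takeWhile p := by
  induction l with
  | nil => simp
  | cons a l ih =>
    rw [List.takeWhile_cons]
    by_cases hp : p a = true
    · simp [hp, ih]
    · simp [hp]

-- closed forms of A's scanning loops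
theorem pvSkipWs_closed (s : List Char) :
    ∀ (fuel : Nat) (i : Int), 0 ≤ i → s.length ≤ i.toNat + fuel →
      pvSkipWsA s fuel i =
        i + (((s.drop i.toNat).takeWhile PySem.Chars.isspace).length : Int) := by
  intro fuel
  induction fuel with
  | zero =>
    intro i h0 hf
    rw [pvSkipWsA, List.drop_eq_nil_of_le (by omega)]
    simp
  | succ fuel ih =>
    intro i h0 hf
    rw [pvSkipWsA]
    by_cases h : i < (s.length : Int) ∧ PySem.Chars.isspace (pvAtA s i) = true
    · rw [if_pos h, ih (i + 1) (by omega) (by omega),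
        pvDrop_cons s i h0 h.1, List.takeWhile_cons, if_pos h.2]
      simp
      omega
    · rw [if_neg h]
      by_cases hl : i < (s.length : Int)
      · have hws : ¬ PySem.Chars.isspace (pvAtA s i) = true := fun hw => h ⟨hl, hw⟩
        rw [pvDrop_cons s i h0 hl, List.takeWhile_cons, if_neg hws]
        simp
      · rw [List.drop_eq_nil_of_le (by omega)]
        simp

theorem pvSkipWsA_ge (s : List Char) (fuel : Nat) (i : Int) (h : (s.length : Int) ≤ i) :
    pvSkipWsA s fuel i = i := by
  cases fuel with
  | zero => rfl
  | succ fuel => rw [pvSkipWsA, if_neg]; rintro ⟨h1, -⟩; omega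

theorem pvStop_iff (c : Char) :
    PySem.Set.contains pvStop c = true ↔ (c = ',' ∨ c = '}') := by
  rw [PySem.Set.contains_iff]
  constructor
  · intro h; simpa [pvStop, PySem.Set.mem_ofList] using h
  · intro h; simp [pvStop, PySem.Set.mem_ofList]; tauto

theorem pvKeep_iff (c : Char) :
    ¬ (PySem.Chars.isspace c = true ∨ PySem.Set.contains pvStop c = true) ↔
      (!pvStopChar c) = true := by
  rw [pvStop_iff]
  simp [pvStopChar]
  tauto

theorem pvBare_closed (s : List Char) :
    ∀ (fuel : Nat) (i : Int), 0 ≤ i → s.length ≤ i.toNat + fuel →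
      pvBareA s pvStop fuel i =
        i + (((s.drop i.toNat).takeWhile (fun c => !pvStopChar c)).length : Int) := by
  intro fuel
  induction fuel with
  | zero =>
    intro i h0 hf
    rw [pvBareA, List.drop_eq_nil_of_le (by omega)]
    simp
  | succ fuel ih =>
    intro i h0 hf
    rw [pvBareA]
    by_cases h : i < (s.length : Int) ∧
        ¬ (PySem.Chars.isspace (pvAtA s i) = true ∨
           PySem.Set.contains pvStop (pvAtA s i) = true)
    · rw [if_pos h, ih (i + 1) (by omega) (by omega),
        pvDrop_cons s i h0 h.1, List.takeWhile_cons, if_pos ((pvKeep_iff _).mp h.2)]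
      simp
      omega
    · rw [if_neg h]
      by_cases hl : i < (s.length : Int)
      · have hk : ¬ (!pvStopChar (pvAtA s i)) = true := by
          intro hw
          exact h ⟨hl, (pvKeep_iff _).mpr hw⟩
        rw [pvDrop_cons s i h0 hl, List.takeWhile_cons, if_neg hk]
        simp
      · rw [List.drop_eq_nil_of_le (by omega)]
        simp

-- scan corollaries: bounds, the suffix after the scan, the scanned slice
theorem pvScan_facts (s : List Char) (p : Char → Bool) (i : Int) (h0 : 0 ≤ i)
    (hn : i ≤ (s.length : Int)) :
    i ≤ i + (((s.drop i.toNat).takeWhile p).length : Int) ∧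
    i + (((s.drop i.toNat).takeWhile p).length : Int) ≤ (s.length : Int) ∧
    s.drop (i + (((s.drop i.toNat).takeWhile p).length : Int)).toNat =
      (s.drop i.toNat).dropWhile p ∧
    PySem.List.slice s (some i) (some (i + (((s.drop i.toNat).takeWhile p).length : Int))) =
      (s.drop i.toNat).takeWhile p := by
  have hlen : ((s.drop i.toNat).takeWhile p).length ≤ s.length - i.toNat := by
    have h1 := (List.takeWhile_prefix (p := p) (l := s.drop i.toNat)).length_le
    simpa using h1
  refine ⟨by omega, by omega, ?_, ?_⟩
  · rw [← pvDrop_len_takeWhile p (s.drop i.toNat), List.drop_drop]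
    congr 1
    omega
  · rw [PySem.List.slice_toNat s h0 (by omega)]
    have : (i + (((s.drop i.toNat).takeWhile p).length : Int)).toNat - i.toNat =
        ((s.drop i.toNat).takeWhile p).length := by omega
    rw [this, pvTake_len_takeWhile]

-- unescape bookkeeping (shared by the two quoted-content readings)
def pvND : List Char → Bool
  | [] => true
  | c :: rest =>
    if c = '\\' then
      match rest with
      | [] => false
      | _ :: r => pvND r
    else pvND rest

theorem pvND_cons_bs (e : Char) (r : List Char) : pvND ('\\' :: e :: r) = pvND r := rfl
theorem pvND_cons (c : Char) (r : List Char) (h : ¬ c = '\\') : pvND (c :: r) = pvND r := by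
  conv_lhs => rw [pvND.eq_def]
  simp [h]

theorem pvUnesc_nil : pvUnescA [] = [] := rfl
theorem pvUnesc_bs_cons (e : Char) (r : List Char) :
    pvUnescA ('\\' :: e :: r) = pvEsc e :: pvUnescA r := rfl
theorem pvUnesc_bs : pvUnescA ['\\'] = [] := rfl
theorem pvUnesc_cons (c : Char) (r : List Char) (h : ¬ c = '\\') :
    pvUnescA (c :: r) = c :: pvUnescA r := by
  conv_lhs => rw [pvUnescA.eq_def]
  simp [h]

theorem pvND_append (xs ys : List Char) (hx : pvND xs = true) (hy : pvND ys = true) :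
    pvND (xs ++ ys) = true := by
  induction xs using pvND.induct with
  | case1 => simpa using hy
  | case2 => exact absurd hx (by decide)
  | case3 c r ih =>
    rw [List.cons_append, List.cons_append, pvND_cons_bs] at *
    exact ih hx
  | case4 c rest h ih =>
    rw [List.cons_append, pvND_cons c _ h] at *
    exact ih hx

theorem pvUnescA_append (xs ys : List Char) (h : pvND xs = true) :
    pvUnescA (xs ++ ys) = pvUnescA xs ++ pvUnescA ys := by
  induction xs using pvUnescA.induct with
  | case1 => simp [pvUnesc_nil]
  | case2 => exact absurd h (by decide)
  | case3 c r ih =>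
    rw [pvND_cons_bs] at h
    simp only [List.cons_append, pvUnesc_bs_cons, ih h]
  | case4 c rest hne ih =>
    rw [pvND_cons c _ hne] at h
    simp only [List.cons_append, pvUnesc_cons c _ hne, ih h]

theorem pvSlice_self (s : List Char) (a : Int) (h : 0 ≤ a) :
    PySem.List.slice s (some a) (some a) = [] := by
  rw [PySem.List.slice_toNat s h h]
  simp

theorem pvSlice_snoc (s : List Char) (a i : Int) (h0 : 0 ≤ a) (ha : a ≤ i)
    (hi : i < (s.length : Int)) :
    PySem.List.slice s (some a) (some (i + 1)) =
      PySem.List.slice s (some a) (some i) ++ [pvAtA s i] := by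
  rw [PySem.List.slice_toNat s h0 (by omega), PySem.List.slice_toNat s h0 (by omega)]
  have h1 : (i + 1).toNat - a.toNat = (i.toNat - a.toNat) + 1 := by omega
  have h3 : i.toNat < s.length := by omega
  have h4 : pvAtA s i = s[i.toNat] := by
    rw [pvAtA, PySem.List.pyGet?_of_nonneg s (show (0:Int) ≤ i by omega),
        List.getElem?_eq_getElem h3]
    rfl
  rw [h1, List.take_add_one]
  congr 1
  rw [List.getElem?_drop]
  have h2 : a.toNat + (i.toNat - a.toNat) = i.toNat := by omega
  rw [h2, List.getElem?_eq_getElem h3]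
  simp [h4]

theorem pvQuotedA_exit (s : List Char) (start : Int) (fuel : Nat) (buf : List Char)
    (i : Int) (h : (s.length : Int) ≤ i) :
    pvQuotedA s start fuel buf i = (pvUnescA (PySem.List.slice s (some start) (some i)), i) := by
  cases fuel with
  | zero => rfl
  | succ fuel => rw [pvQuotedA, if_neg (by omega)]

theorem pvEscDict_getD (e : Char) : PySem.Dict.getD pvEscDict e e = pvEsc e := by
  have hd : pvEscDict = PySem.Dict.mk [('n', '\n'), ('r', '\r'), ('t', '\t')] := by decide
  rw [hd]
  by_cases h1 : e = 'n'
  · subst h1; decide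
  by_cases h2 : e = 'r'
  · subst h2; decide
  by_cases h3 : e = 't'
  · subst h3; decide
  simp [PySem.Dict.getD, PySem.Dict.get?, pvEsc,
    Ne.symm h1, Ne.symm h2, Ne.symm h3, h1, h2, h3]

-- reduction shapes of B's quoted reader
theorem pvTQ_nil (out : List Char) : pvTakeQuoted out [] = (out, []) := rfl
theorem pvTQ_bs_nil (out : List Char) : pvTakeQuoted out ['\\'] = (out, []) := by
  rw [pvTakeQuoted.eq_def]
  simp
theorem pvTQ_bs_cons (out : List Char) (e : Char) (r : List Char) :
    pvTakeQuoted out ('\\' :: e :: r) =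
      pvTakeQuoted (out ++ [PySem.Dict.getD pvEscDict e e]) r := by
  rw [pvTakeQuoted.eq_def]
  simp
theorem pvTQ_quote (out : List Char) (r : List Char) :
    pvTakeQuoted out ('"' :: r) = (out, r) := by
  rw [pvTakeQuoted.eq_def]
  simp
theorem pvTQ_other (out : List Char) (c : Char) (r : List Char) (h1 : ¬ c = '\\')
    (h2 : ¬ c = '"') : pvTakeQuoted out (c :: r) = pvTakeQuoted (out ++ [c]) r := by
  rw [pvTakeQuoted.eq_def]
  simp [h1, h2]

-- A's quoted scanner versus B's on-the-fly unescaping reader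
theorem pvQuoted_to_alt (s : List Char) (start : Int) (h0 : 0 ≤ start) :
    ∀ (fuel : Nat) (i : Int) (raw : List Char), start ≤ i → i ≤ (s.length : Int) →
      s.length ≤ i.toNat + fuel →
      raw = PySem.List.slice s (some start) (some i) → pvND raw = true →
      ∃ j : Int, i ≤ j ∧ j ≤ (s.length : Int) ∧
        pvQuotedA s start fuel raw i =
          ((pvTakeQuoted (pvUnescA raw) (s.drop i.toNat)).1, j) ∧
        s.drop j.toNat = (pvTakeQuoted (pvUnescA raw) (s.drop i.toNat)).2 := by
  intro fuel
  induction fuel with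
  | zero =>
    intro i raw hsi hn hf hraw hnd
    have hdz : s.drop i.toNat = [] := List.drop_eq_nil_of_le (by omega)
    rw [pvQuotedA, hdz, pvTQ_nil, ← hraw]
    exact ⟨i, le_refl i, hn, rfl, hdz⟩
  | succ fuel ih =>
    intro i raw hsi hn hf hraw hnd
    by_cases hl : i < (s.length : Int)
    · have hdrop := pvDrop_cons s i (by omega) hl
      rw [pvQuotedA, if_pos hl, hdrop]
      by_cases hbs : pvAtA s i = '\\'
      · by_cases h2 : i + 1 < (s.length : Int)
        · -- escape pair
          rw [if_pos ⟨hbs, h2⟩, hbs]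
          have hdrop2 := pvDrop_cons s (i + 1) (by omega) h2
          rw [hdrop2, pvTQ_bs_cons, pvEscDict_getD,
              show i + 1 + 1 = i + 2 by ring]
          have hnd1 : pvND ['\\', pvAtA s (i + 1)] = true := by
            rw [pvND_cons_bs]
            rfl
          have hraw2 : raw ++ ['\\', pvAtA s (i + 1)] =
              PySem.List.slice s (some start) (some (i + 2)) := by
            rw [show i + 2 = (i + 1) + 1 by ring,
                pvSlice_snoc s start (i + 1) h0 (by omega) h2,
                pvSlice_snoc s start i h0 (by omega) hl, ← hraw, hbs]
            simp
          have hun2 : pvUnescA (raw ++ ['\\', pvAtA s (i + 1)]) =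
              pvUnescA raw ++ [pvEsc (pvAtA s (i + 1))] := by
            rw [pvUnescA_append raw _ hnd, pvUnesc_bs_cons, pvUnesc_nil]
          obtain ⟨j, hj1, hj2, hj3, hj4⟩ :=
            ih (i + 2) (raw ++ ['\\', pvAtA s (i + 1)]) (by omega) (by omega)
              (by omega) hraw2 (pvND_append _ _ hnd hnd1)
          rw [hun2] at hj3 hj4
          exact ⟨j, by omega, hj2, hj3, hj4⟩
        · -- lone trailing backslash
          have hin : i + 1 = (s.length : Int) := by omega
          rw [if_neg (fun hx => h2 hx.2), if_neg (by rw [hbs]; decide), hbs]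
          have hdz : s.drop (i + 1).toNat = [] := List.drop_eq_nil_of_le (by omega)
          rw [hdz, pvTQ_bs_nil,
              pvQuotedA_exit s start fuel _ (i + 1) (by omega),
              pvSlice_snoc s start i h0 hsi hl, ← hraw, hbs,
              pvUnescA_append raw ['\\'] hnd, pvUnesc_bs]
          exact ⟨i + 1, by omega, by omega, by simp, hdz⟩
      · have hA : ¬ (pvAtA s i = '\\' ∧ i + 1 < (s.length : Int)) := fun hx => hbs hx.1
        by_cases hq : pvAtA s i = '"'
        · -- closing quote
          rw [if_neg hA, if_pos hq, hq, pvTQ_quote]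
          have hif : (if raw ≠ [] then raw
              else PySem.List.slice s (some start) (some i)) = raw := by
            by_cases hr : raw = [] <;> simp [hr, ← hraw]
          rw [hif]
          exact ⟨i + 1, by omega, by omega, rfl, rfl⟩
        · -- plain character
          rw [if_neg hA, if_neg hq, pvTQ_other _ _ _ hbs hq]
          have hnd1 : pvND [pvAtA s i] = true := by
            rw [pvND_cons _ _ hbs]
            rfl
          have hraw2 : raw ++ [pvAtA s i] =
              PySem.List.slice s (some start) (some (i + 1)) := by
            rw [pvSlice_snoc s start i h0 (by omega) hl, ← hraw]
          have hun2 : pvUnescA (raw ++ [pvAtA s i]) = pvUnescA raw ++ [pvAtA s i] := by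
            rw [pvUnescA_append raw _ hnd, pvUnesc_cons _ _ hbs, pvUnesc_nil]
          obtain ⟨j, hj1, hj2, hj3, hj4⟩ :=
            ih (i + 1) (raw ++ [pvAtA s i]) (by omega) (by omega) (by omega) hraw2
              (pvND_append _ _ hnd hnd1)
          rw [hun2] at hj3 hj4
          exact ⟨j, by omega, hj2, hj3, hj4⟩
    · have hdz : s.drop i.toNat = [] := List.drop_eq_nil_of_le (by omega)
      rw [pvQuotedA, if_neg hl, hdz, pvTQ_nil, ← hraw]
      exact ⟨i, le_refl i, hn, rfl, hdz⟩

-- the two main loops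
theorem pvLoop_to_alt (s : List Char) :
    ∀ (fA fB : Nat) (i : Int) (keys : List String), 0 ≤ i → i ≤ (s.length : Int) →
      s.length < i.toNat + fA → s.length - i.toNat < fB →
      pvLoopA s fA keys i = pvLoopAlt (s.length : Int) fB keys (s.drop i.toNat) := by
  intro fA
  induction fA with
  | zero =>
    intro fB i keys h0 hn hA hB
    exfalso
    omega
  | succ fa ih =>
    intro fB i keys h0 hn hA hB
    obtain ⟨fb, rfl⟩ : ∃ fb, fB = fb + 1 := ⟨fB - 1, by omega⟩
    by_cases hin : i < (s.length : Int)
    case neg =>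
      have hdz : s.drop i.toNat = [] := List.drop_eq_nil_of_le (by omega)
      rw [pvLoopA, if_neg hin, pvLoopAlt, hdz,
          if_pos (by simp : (([] : List Char)).isEmpty = true)]
      exact congrArg (Prod.mk keys) (by simp only [List.length_nil, Nat.cast_zero]; omega)
    case pos =>
      have hdne : ¬ (s.drop i.toNat).isEmpty = true := by
        simp only [List.isEmpty_iff, List.drop_eq_nil_iff]
        omega
      have hskip1 := pvSkipWs_closed s (s.length + 1) i h0 (by omega)
      set i1 := i + (((s.drop i.toNat).takeWhile PySem.Chars.isspace).length : Int) with hi1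
      have hw1a : i ≤ i1 := by rw [hi1]; exact (pvScan_facts s _ i h0 (by omega)).1
      have hw1b : i1 ≤ (s.length : Int) := by
        rw [hi1]; exact (pvScan_facts s _ i h0 (by omega)).2.1
      have hw1c : s.drop i1.toNat = (s.drop i.toNat).dropWhile PySem.Chars.isspace := by
        rw [hi1]; exact (pvScan_facts s _ i h0 (by omega)).2.2.1
      have hlstrip : PySem.Chars.lstrip (s.drop i.toNat) = s.drop i1.toNat := by
        simp only [PySem.Chars.lstrip]
        rw [hw1c]
      rw [pvLoopA, if_pos hin, pvLoopAlt, if_neg hdne]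
      simp only [pvTokenA, hskip1, hlstrip]
      rcases hc : s.drop i1.toNat with _ | ⟨c, u⟩
      · -- only whitespace remains: A appends the empty token and stops
        have hi1e : i1 = (s.length : Int) := by
          have := List.drop_eq_nil_iff.mp hc
          omega
        rw [if_pos (by omega : (s.length : Int) ≤ i1)]
        dsimp only
        rw [pvSkipWsA_ge s (s.length + 1) i1 (by omega),
            if_pos (by omega : (s.length : Int) ≤ i1),
            if_pos (by simp : (([] : List Char)).isEmpty = true),
            show String.ofList ([] : List Char) = "" from rfl]
        exact congrArg (Prod.mk (keys ++ [""])) hi1e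
      · -- a token starts at i1
        have hi1n : i1 < (s.length : Int) := by
          have : i1.toNat < s.length := by
            have := congrArg List.length hc
            simp only [List.length_drop, List.length_cons] at this
            omega
          omega
        have hdc := pvDrop_cons s i1 (by omega) hi1n
        rw [hc] at hdc
        have hcat : pvAtA s i1 = c := (List.cons.injEq _ _ _ _ |>.mp hdc.symm).1
        have hu : u = s.drop (i1 + 1).toNat := (List.cons.injEq _ _ _ _ |>.mp hdc.symm).2.symm
        have hcws : PySem.Chars.isspace c = false := by
          rw [hw1c] at hc
          exact pvDropWhile_head hc
        -- the common continuation after a token ending at j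
        have hcont : ∀ (keys' : List String) (j : Int), i1 ≤ j → j ≤ (s.length : Int) →
            (i + 1 ≤ j ∨ (j = i1 ∧ pvStopChar c = true)) →
            ((if (s.length : Int) ≤ pvSkipWsA s (s.length + 1) j then
                (keys', pvSkipWsA s (s.length + 1) j)
              else if pvAtA s (pvSkipWsA s (s.length + 1) j) = ',' then
                pvLoopA s fa keys' (pvSkipWsA s (s.length + 1) j + 1)
              else if pvAtA s (pvSkipWsA s (s.length + 1) j) = '}' then
                (keys', pvSkipWsA s (s.length + 1) j + 1)
              else pvLoopA s fa keys' (pvSkipWsA s (s.length + 1) j)) : List String × Int) =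
            (if (PySem.Chars.lstrip (s.drop j.toNat)).isEmpty then (keys', (s.length : Int))
             else if (PySem.Chars.lstrip (s.drop j.toNat)).head? = some ',' then
               pvLoopAlt (s.length : Int) fb keys' (PySem.Chars.lstrip (s.drop j.toNat)).tail
             else if (PySem.Chars.lstrip (s.drop j.toNat)).head? = some '}' then
               (keys', (s.length : Int) - ((PySem.Chars.lstrip (s.drop j.toNat)).length : Int) + 1)
             else pvLoopAlt (s.length : Int) fb keys' (PySem.Chars.lstrip (s.drop j.toNat))) := by
          intro keys' j hij hjn hprog
          have hj0 : 0 ≤ j := by omega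
          have hskip2 := pvSkipWs_closed s (s.length + 1) j hj0 (by omega)
          set i2 := j + (((s.drop j.toNat).takeWhile PySem.Chars.isspace).length : Int) with hi2
          have hw2a : j ≤ i2 := by rw [hi2]; exact (pvScan_facts s _ j hj0 hjn).1
          have hw2b : i2 ≤ (s.length : Int) := by
            rw [hi2]; exact (pvScan_facts s _ j hj0 hjn).2.1
          have hw2c : s.drop i2.toNat = (s.drop j.toNat).dropWhile PySem.Chars.isspace := by
            rw [hi2]; exact (pvScan_facts s _ j hj0 hjn).2.2.1
          have hlst2 : PySem.Chars.lstrip (s.drop j.toNat) = s.drop i2.toNat := by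
            simp only [PySem.Chars.lstrip]
            rw [hw2c]
          rw [hskip2, hlst2]
          rcases hc2 : s.drop i2.toNat with _ | ⟨d, v⟩
          · have hi2e : i2 = (s.length : Int) := by
              have := List.drop_eq_nil_iff.mp hc2
              omega
            rw [if_pos (by omega : (s.length : Int) ≤ i2),
                if_pos (by simp : (([] : List Char)).isEmpty = true)]
            exact congrArg (Prod.mk keys') hi2e
          · have hi2n : i2 < (s.length : Int) := by
              have : i2.toNat < s.length := by
                have := congrArg List.length hc2
                simp only [List.length_drop, List.length_cons] at this
                omega
              omega
            have hdc2 := pvDrop_cons s i2 (by omega) hi2n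
            rw [hc2] at hdc2
            have hdat : pvAtA s i2 = d := (List.cons.injEq _ _ _ _ |>.mp hdc2.symm).1
            have hv : v = s.drop (i2 + 1).toNat :=
              (List.cons.injEq _ _ _ _ |>.mp hdc2.symm).2.symm
            have hdws : PySem.Chars.isspace d = false := by
              rw [hw2c] at hc2
              exact pvDropWhile_head hc2
            rw [if_neg (by omega : ¬ (s.length : Int) ≤ i2), hdat,
                if_neg (by simp : ¬ ((d :: v).isEmpty = true))]
            simp only [List.head?_cons, List.tail_cons, Option.some.injEq, List.length_cons]
            by_cases hdc' : d = ','
            · rw [if_pos hdc', if_pos hdc', hv]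
              exact ih fb (i2 + 1) keys' (by omega) (by omega) (by omega) (by omega)
            · rw [if_neg hdc', if_neg hdc']
              by_cases hdb : d = '}'
              · rw [if_pos hdb, if_pos hdb]
                refine congrArg (Prod.mk keys') ?_
                have hlv : ((v.length : Int) + 1) = (s.length : Int) - i2 := by
                  have := congrArg List.length hc2
                  simp only [List.length_drop, List.length_cons] at this
                  omega
                push_cast
                omega
              · rw [if_neg hdb, if_neg hdb]
                -- progress: the else branch cannot start at an unconsumed token
                have hprog2 : i + 1 ≤ i2 := by
                  rcases hprog with hp | ⟨hje, hstop⟩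
                  · omega
                  · exfalso
                    subst hje
                    have htw : (s.drop i1.toNat).takeWhile PySem.Chars.isspace = [] := by
                      rw [hc, List.takeWhile_cons, if_neg (by simp [hcws])]
                    have hi2i1 : i2 = i1 := by rw [hi2, htw]; simp
                    rw [hi2i1] at hc2
                    rw [hc] at hc2
                    have hdce : c = d := ((List.cons.injEq _ _ _ _).mp hc2).1
                    rw [pvStopChar, hcws] at hstop
                    simp only [Bool.false_or, Bool.or_eq_true, beq_iff_eq] at hstop
                    rcases hstop with h | h
                    · exact hdc' (by rw [← hdce]; exact h)
                    · exact hdb (by rw [← hdce]; exact h)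
                have := ih fb i2 keys' (by omega) (by omega) (by omega) (by omega)
                rw [hc2] at this
                exact this
        -- now dispatch on the kind of token at i1
        rw [if_neg (by omega : ¬ (s.length : Int) ≤ i1), hcat,
            if_neg (by simp : ¬ ((c :: u).isEmpty = true))]
        simp only [List.head?_cons, List.tail_cons, Option.some.injEq]
        by_cases hq : c = '"'
        · -- quoted token
          rw [if_pos hq, if_pos hq]
          obtain ⟨j, hj1, hj2, hj3, hj4⟩ :=
            pvQuoted_to_alt s (i1 + 1) (by omega) (s.length + 1) (i1 + 1) [] le_rfl
              (by omega) (by omega) (pvSlice_self s (i1 + 1) (by omega)).symm rfl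
          rw [pvUnesc_nil] at hj3 hj4
          rw [← hu] at hj3 hj4
          rw [hj3]
          dsimp only
          rw [← hj4]
          exact hcont _ j (by omega) hj2 (Or.inl (by omega))
        · -- bareword token
          rw [if_neg hq, if_neg hq]
          have hbare := pvBare_closed s (s.length + 1) i1 (by omega) (by omega)
          set jb := i1 + (((s.drop i1.toNat).takeWhile fun c => !pvStopChar c).length : Int)
            with hjb
          have hb1 : i1 ≤ jb := by
            rw [hjb]; exact (pvScan_facts s _ i1 (by omega) (by omega)).1
          have hb2 : jb ≤ (s.length : Int) := by
            rw [hjb]; exact (pvScan_facts s _ i1 (by omega) (by omega)).2.1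
          have hb3 : s.drop jb.toNat = (s.drop i1.toNat).dropWhile fun c => !pvStopChar c := by
            rw [hjb]; exact (pvScan_facts s _ i1 (by omega) (by omega)).2.2.1
          have hb4 : PySem.List.slice s (some i1) (some jb) =
              (s.drop i1.toNat).takeWhile fun c => !pvStopChar c := by
            rw [hjb]; exact (pvScan_facts s _ i1 (by omega) (by omega)).2.2.2
          rw [hc] at hb3 hb4
          rw [hbare, hb4, ← hb3]
          dsimp only
          refine hcont _ jb hb1 hb2 ?_
          by_cases hK : ((s.drop i1.toNat).takeWhile fun c => !pvStopChar c) = []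
          · right
            refine ⟨by rw [hjb, hK]; simp, ?_⟩
            rw [hc, List.takeWhile_cons] at hK
            by_cases hkc : (!pvStopChar c) = true
            · rw [if_pos hkc] at hK
              simp at hK
            · simpa using hkc
          · left
            have : 0 < ((s.drop i1.toNat).takeWhile fun c => !pvStopChar c).length :=
              List.length_pos_of_ne_nil hK
            omega

-- ===== VERDICT =====
theorem parse_keys_py_spec : Claim_equal_parse_keys_py := by
  intro text idx _hdom hpre
  have hpre' : (-1 : Int) ≤ idx := hpre
  have h0 : (0 : Int) ≤ idx + 1 := by omega
  simp only [Spec_parse_keys_py, parse_keys_py, parse_keys_py_alt]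
  rw [PySem.List.slice_from text.toList h0]
  set s := text.toList with hs
  by_cases hbig : (s.length : Int) < idx + 1
  · -- start index beyond the end: both sides return ([], idx + 1)
    have hdz : s.drop (idx + 1).toNat = [] := List.drop_eq_nil_of_le (by omega)
    rw [hdz]
    simp only [PySem.Chars.lstrip, List.dropWhile_nil, List.head?_nil, List.length_nil]
    rw [pvSkipWsA_ge s (s.length + 1) (idx + 1) (by omega)]
    rw [if_neg (show ¬ (idx + 1 < (s.length : Int) ∧ pvAtA s (idx + 1) = '}') by
      rintro ⟨h1, -⟩; omega)]
    rw [pvLoopA, if_neg (by omega : ¬ idx + 1 < (s.length : Int))]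
    rw [if_neg (show ¬ ((none : Option Char) = some '}') by simp)]
    rw [pvLoopAlt, if_pos (by simp : (([] : List Char)).isEmpty = true)]
    exact congrArg (Prod.mk ([] : List String)) (by simp)
  · -- start index inside the text: m is the length and positions match suffix lengths
    have hm : idx + 1 + ((s.drop (idx + 1).toNat).length : Int) = (s.length : Int) := by
      rw [List.length_drop]
      omega
    rw [hm]
    have hskip1 := pvSkipWs_closed s (s.length + 1) (idx + 1) h0 (by omega)
    set i1 := (idx + 1) +
      (((s.drop (idx + 1).toNat).takeWhile PySem.Chars.isspace).length : Int) with hi1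
    have hw1b : i1 ≤ (s.length : Int) := by
      rw [hi1]; exact (pvScan_facts s _ (idx + 1) h0 (by omega)).2.1
    have hw1c : s.drop i1.toNat = (s.drop (idx + 1).toNat).dropWhile PySem.Chars.isspace := by
      rw [hi1]; exact (pvScan_facts s _ (idx + 1) h0 (by omega)).2.2.1
    have hlstrip : PySem.Chars.lstrip (s.drop (idx + 1).toNat) = s.drop i1.toNat := by
      simp only [PySem.Chars.lstrip]
      rw [hw1c]
    rw [hskip1, hlstrip]
    by_cases htop : i1 < (s.length : Int) ∧ pvAtA s i1 = '}'
    · rw [if_pos htop]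
      have hdc := pvDrop_cons s i1 (by omega) htop.1
      rw [hdc, htop.2, if_pos (by simp)]
      refine congrArg (Prod.mk ([] : List String)) ?_
      simp only [List.length_cons, List.length_drop]
      push_cast
      omega
    · rw [if_neg htop]
      have hhd : ¬ (s.drop i1.toNat).head? = some '}' := by
        intro hh
        rcases hx : s.drop i1.toNat with _ | ⟨c, u⟩
        · rw [hx] at hh
          simp at hh
        · rw [hx] at hh
          simp only [List.head?_cons, Option.some.injEq] at hh
          have hi1n : i1 < (s.length : Int) := by
            have : i1.toNat < s.length := by
              have := congrArg List.length hx
              simp only [List.length_drop, List.length_cons] at this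
              omega
            omega
          have hdc := pvDrop_cons s i1 (by omega) hi1n
          rw [hx] at hdc
          exact htop ⟨hi1n, by rw [(List.cons.injEq _ _ _ _ |>.mp hdc.symm).1, hh]⟩
      rw [if_neg hhd]
      have hfin := pvLoop_to_alt s (s.length + 1) ((s.drop i1.toNat).length + 1) i1 []
        (by omega) hw1b (by omega) (by rw [List.length_drop]; omega)
      exact hfin
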